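-- pv_equiv track=rewrite | github.com/derek-dkliu/pydsa | recursions/robot_grid.py | robot_grid2
-- ===== SOURCE A (Python) =====
-- def robot_grid2(grid):
--     n = len(grid)
--     m = len(grid[0])
--     dp = [[False] * (m + 1) for _ in range(n + 1)]
--     for i in range(n - 1, -1, -1):
--         for j in range(m - 1, -1, -1):
--             if grid[i][j] == 0:
--                 dp[i][j] = False
--             elif i == n - 1 and j == m - 1:
--                 dp[i][j] = True
--             else:
--                 dp[i][j] = dp[i+1][j] or dp[i][j+1]
--
--     # find out the path
--     if not dp[0][0]: return []
--     path = [(0, 0)]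
--     row, col = 0, 0
--     while True:
--         if row + 1 < n and dp[row + 1][col]:
--             row += 1
--             path.append((row, col))
--         elif col + 1 < m and dp[row][col + 1]:
--             col += 1
--             path.append((row, col))
--         else:
--             break
--         if row == n - 1 and col == m - 1:
--             break
--     return path
-- ===== SOURCE B (Python) =====
-- def robot_grid2(grid):
--     n = len(grid)
--     m = len(grid[0])
--     below = [None] * m
--     for i in range(n - 1, -1, -1):
--         cur = [None] * m
--         for j in range(m - 1, -1, -1):
--             if grid[i][j] != 0:
--                 if i == n - 1 and j == m - 1:
--                     cur[j] = [(i, j)]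
--                 elif below[j] is not None:
--                     cur[j] = [(i, j)] + below[j]
--                 elif j + 1 < m and cur[j + 1] is not None:
--                     cur[j] = [(i, j)] + cur[j + 1]
--         below = cur
--     if m > 0 and below[0] is not None:
--         return below[0]
--     return []
-- ===== Notes on version B (the rewrite author's own statement) =====
-- stated objective: alternative
-- what changed: Replaces A's two-phase scheme (boolean reachability DP table plus a greedy down-first walk to reconstruct the path) with a single bottom-up pass that tabulates, per cell, the optional down-first path itself, keeping only the current and previous row; the answer is read off at (0,0) with no second phase.
import Mathlib
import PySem

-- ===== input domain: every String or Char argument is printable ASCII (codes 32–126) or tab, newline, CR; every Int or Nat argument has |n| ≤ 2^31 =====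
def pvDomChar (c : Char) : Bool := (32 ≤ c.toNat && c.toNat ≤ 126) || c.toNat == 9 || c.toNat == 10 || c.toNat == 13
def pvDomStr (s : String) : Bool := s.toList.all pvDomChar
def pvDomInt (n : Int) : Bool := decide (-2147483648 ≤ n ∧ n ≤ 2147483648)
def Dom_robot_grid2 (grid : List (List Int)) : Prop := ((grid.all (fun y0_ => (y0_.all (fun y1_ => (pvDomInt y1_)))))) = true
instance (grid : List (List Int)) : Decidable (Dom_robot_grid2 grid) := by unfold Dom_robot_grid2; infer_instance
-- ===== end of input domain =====

-- B replaces A's two-phase scheme (boolean DP table + greedy down-first walk) with one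
-- bottom-up pass tabulating per cell the optional down-first path itself (alternative
-- decomposition, similar cost); equal return value on every grid admitted by Pre_.

-- ===== PORT A =====
-- dp[i][j] lookup (indices are always nonnegative and in range on admitted inputs)
def dpGetB (dp : List (List Bool)) (i j : Int) : Bool :=
  PySem.List.pyGetD (PySem.List.pyGetD dp i []) j false

-- the 'while True' reconstruction loop of A; fuel only totalizes it (each step moves
-- down or right, so n+m steps always suffice; fuel exhaustion mirrors 'break')
def walkGo (n m : Int) (dp : List (List Bool)) : Nat → Int → Int → List (Int × Int) → List (Int × Int)
  | 0, _, _, path => path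
  | fuel+1, row, col, path =>
    if (row + 1 < n ∧ dpGetB dp (row+1) col) then
      (if row + 1 = n - 1 ∧ col = m - 1 then path ++ [(row+1, col)]
       else walkGo n m dp fuel (row+1) col (path ++ [(row+1, col)]))
    else if (col + 1 < m ∧ dpGetB dp row (col+1)) then
      (if row = n - 1 ∧ col + 1 = m - 1 then path ++ [(row, col+1)]
       else walkGo n m dp fuel row (col+1) (path ++ [(row, col+1)]))
    else path

-- body of A's inner 'for j' loop: dp[i][j] = ...
def innA (grid : List (List Int)) (n m i : Int) (dp : List (List Bool)) (j : Int) : List (List Bool) :=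
  let v : Bool :=
    if PySem.List.pyGetD (PySem.List.pyGetD grid i []) j 0 = 0 then false
    else if i = n - 1 ∧ j = m - 1 then true
    else (dpGetB dp (i+1) j || dpGetB dp i (j+1))
  PySem.List.pySetD dp i (PySem.List.pySetD (PySem.List.pyGetD dp i []) j v)

-- A's inner 'for j in range(m-1, -1, -1)' loop
def outA (grid : List (List Int)) (n m : Int) (dp : List (List Bool)) (i : Int) : List (List Bool) :=
  (PySem.List.pyRange (m-1) (-1) (-1)).foldl (innA grid n m i) dp

def robot_grid2 (grid : List (List Int)) : List (Int × Int) :=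
  let n : Int := grid.length
  let m : Int := (PySem.List.pyGetD grid 0 []).length
  let dp0 : List (List Bool) := List.replicate (n.toNat + 1) (List.replicate (m.toNat + 1) false)
  let dp := (PySem.List.pyRange (n-1) (-1) (-1)).foldl (outA grid n m) dp0
  if ¬ dpGetB dp 0 0 then []
  else walkGo n m dp (n.toNat + m.toNat) 0 0 [((0 : Int), (0 : Int))]

-- ===== PORT B =====
-- body of B's inner 'for j' loop over the current row
def innB (grid : List (List Int)) (n m : Int) (below : List (Option (List (Int × Int))))
    (i : Int) (cur : List (Option (List (Int × Int)))) (j : Int) :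
    List (Option (List (Int × Int))) :=
  if PySem.List.pyGetD (PySem.List.pyGetD grid i []) j 0 ≠ 0 then
    if i = n - 1 ∧ j = m - 1 then
      PySem.List.pySetD cur j (some [(i, j)])
    else
      match PySem.List.pyGetD below j none with
      | some p => PySem.List.pySetD cur j (some ((i, j) :: p))
      | none =>
        if j + 1 < m then
          match PySem.List.pyGetD cur (j+1) none with
          | some p => PySem.List.pySetD cur j (some ((i, j) :: p))
          | none => cur
        else cur
  else cur

-- B's inner loop: build cur = [None]*m, fill it right-to-left, yield it as the new 'below'
def outB (grid : List (List Int)) (n m : Int) (below : List (Option (List (Int × Int))))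
    (i : Int) : List (Option (List (Int × Int))) :=
  (PySem.List.pyRange (m-1) (-1) (-1)).foldl (innB grid n m below i) (List.replicate m.toNat none)

def robot_grid2_alt (grid : List (List Int)) : List (Int × Int) :=
  let n : Int := grid.length
  let m : Int := (PySem.List.pyGetD grid 0 []).length
  let below0 : List (Option (List (Int × Int))) := List.replicate m.toNat none
  let below := (PySem.List.pyRange (n-1) (-1) (-1)).foldl (outB grid n m) below0
  if 0 < m then
    match PySem.List.pyGetD below 0 none with
    | some p => p
    | none => []
  else []

-- ===== PRECONDITION & SPEC =====
-- Pre_ excludes exactly the inputs where Python A raises IndexError: the empty grid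
-- (grid[0]) and grids with a row shorter than the first row (grid[i][j] for j < m).
def Pre_robot_grid2 (grid : List (List Int)) : Prop :=
  grid ≠ [] ∧ ∀ row ∈ grid, (PySem.List.pyGetD grid 0 []).length ≤ row.length
instance (grid : List (List Int)) : Decidable (Pre_robot_grid2 grid) := by
  unfold Pre_robot_grid2; infer_instance
def pvWitness_robot_grid2 : List (List Int) := [[1, 1], [0, 1]]

def Spec_robot_grid2 (grid : List (List Int)) (out : List (Int × Int)) : Prop := out = robot_grid2_alt grid
instance (grid : List (List Int)) (out : List (Int × Int)) : Decidable (Spec_robot_grid2 grid out) := by unfold Spec_robot_grid2; infer_instance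

-- ===== CLAIM (what is proved, stated in full; the proofs are below) =====
def Claim_equal_robot_grid2 : Prop := ∀ (grid : List (List Int)), Dom_robot_grid2 grid → Pre_robot_grid2 grid → Spec_robot_grid2 grid (robot_grid2 grid)

-- ===== LEMMAS AND PROOFS =====

-- reference function: the down-first path from cell (i,j), or none
def bestP (g : Nat → Nat → Int) (N M : Nat) (i j : Nat) : Option (List (Int × Int)) :=
  if _h : i < N ∧ j < M then
    if g i j = 0 then none
    else if i = N - 1 ∧ j = M - 1 then some [((i : Int), (j : Int))]
    else
      match bestP g N M (i+1) j with
      | some p => some (((i : Int), (j : Int)) :: p)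
      | none =>
        match bestP g N M i (j+1) with
        | some p => some (((i : Int), (j : Int)) :: p)
        | none => none
  else none
termination_by (N - i) + (M - j)
decreasing_by all_goals omega

-- grid cell access shared by both invariant arguments
def gOf (grid : List (List Int)) (i j : Nat) : Int := (grid.getD i []).getD j 0

-- ---- generic list/fold helpers ----

theorem map_range_congr {α : Type} {f h : Nat → α} (n : Nat)
    (H : ∀ k, k < n → f k = h k) :
    (List.range n).map f = (List.range n).map h := by
  apply List.map_congr_left
  intro k hk
  exact H k (List.mem_range.mp hk)

theorem replicate_eq_map_range {α : Type} (n : Nat) (a : α) :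
    List.replicate n a = (List.range n).map (fun _ => a) := by
  apply List.ext_getElem <;> simp

theorem map_range_set {α : Type} (f : Nat → α) (n k : Nat) (v : α) :
    ((List.range n).map f).set k v
      = (List.range n).map (fun x => if x = k then v else f x) := by
  apply List.ext_getElem
  · simp
  · intro i h1 h2
    simp only [List.getElem_set, List.getElem_map, List.getElem_range]
    rcases eq_or_ne i k with hik | hik
    · subst hik; simp
    · simp [hik, hik.symm]

theorem map_range_getD {α : Type} (f : Nat → α) (n k : Nat) (d : α) (hk : k < n) :
    ((List.range n).map f).getD k d = f k := by
  rw [List.getD_eq_getElem?_getD]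
  simp [hk]

-- fold over Python's range(a-1, -1, -1): countdown induction principle
theorem foldl_countdown {σ : Type} (f : σ → Int → σ) (P : Nat → σ → Prop) :
    ∀ (a : Nat) (s : σ),
      (∀ (k : Nat) (s' : σ), k < a → P (k+1) s' → P k (f s' (k : Int))) →
      P a s →
      P 0 ((PySem.List.pyRange ((a : Int) - 1) (-1) (-1)).foldl f s) := by
  intro a
  induction a with
  | zero =>
    intro s _ h
    rw [PySem.List.pyRange_neg_one_eq_nil (by omega)]
    simpa using h
  | succ a ih =>
    intro s hstep h
    have h1 : ((a + 1 : Nat) : Int) - 1 = (a : Int) := by push_cast; ring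
    rw [h1, PySem.List.pyRange_neg_one_cons (by omega)]
    simp only [List.foldl_cons]
    exact ih (f s (a : Int)) (fun k s' hk hp => hstep k s' (by omega) hp)
      (hstep a s (by omega) h)

-- ---- bestP characterisation ----

theorem bestP_out (g : Nat → Nat → Int) (N M i j : Nat) (h : ¬ (i < N ∧ j < M)) :
    bestP g N M i j = none := by
  rw [bestP]; simp [h]

theorem bestP_in (g : Nat → Nat → Int) (N M i j : Nat) (hi : i < N) (hj : j < M) :
    bestP g N M i j =
      (if g i j = 0 then none
       else if i = N - 1 ∧ j = M - 1 then some [((i : Int), (j : Int))]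
       else
         match bestP g N M (i+1) j with
         | some p => some (((i : Int), (j : Int)) :: p)
         | none =>
           match bestP g N M i (j+1) with
           | some p => some (((i : Int), (j : Int)) :: p)
           | none => none) := by
  rw [bestP]; simp [hi, hj]

theorem bestP_some_inrange (g : Nat → Nat → Int) (N M i j : Nat)
    (p : List (Int × Int)) (h : bestP g N M i j = some p) : i < N ∧ j < M := by
  by_contra hc
  rw [bestP_out g N M i j hc] at h
  simp at h

theorem bestP_some_head (g : Nat → Nat → Int) (N M i j : Nat)
    (p : List (Int × Int)) (h : bestP g N M i j = some p) :
    ∃ t, p = ((i : Int), (j : Int)) :: t := by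
  obtain ⟨hi, hj⟩ := bestP_some_inrange g N M i j p h
  rw [bestP_in g N M i j hi hj] at h
  split_ifs at h with h0 hg
  · exact ⟨[], by simpa using h.symm⟩
  · rcases hc : bestP g N M (i+1) j with _ | p1 <;> rw [hc] at h
    · rcases hc2 : bestP g N M i (j+1) with _ | p2 <;> rw [hc2] at h
      · simp at h
      · exact ⟨p2, by simpa using h.symm⟩
    · exact ⟨p1, by simpa using h.symm⟩

theorem bestP_isSome (g : Nat → Nat → Int) (N M i j : Nat) (hi : i < N) (hj : j < M) :
    (bestP g N M i j).isSome =
      (if g i j = 0 then false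
       else if i = N - 1 ∧ j = M - 1 then true
       else ((bestP g N M (i+1) j).isSome || (bestP g N M i (j+1)).isSome)) := by
  rw [bestP_in g N M i j hi hj]
  split_ifs with h0 hg
  · rfl
  · rfl
  · rcases bestP g N M (i+1) j with _ | p1
    · rcases bestP g N M i (j+1) with _ | p2 <;> simp
    · simp

theorem bestP_length_aux (g : Nat → Nat → Int) (N M : Nat) :
    ∀ (d i j : Nat) (p : List (Int × Int)), (N - i) + (M - j) ≤ d →
      bestP g N M i j = some p → p.length + i + j + 1 = N + M := by
  intro d
  induction d with
  | zero =>
    intro i j p hd h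
    have := bestP_some_inrange g N M i j p h
    omega
  | succ d ih =>
    intro i j p hd h
    obtain ⟨hi, hj⟩ := bestP_some_inrange g N M i j p h
    rw [bestP_in g N M i j hi hj] at h
    split_ifs at h with h0 hg
    · have hp : p = [((i : Int), (j : Int))] := by simpa using h.symm
      subst hp
      simp only [List.length_cons, List.length_nil]
      omega
    · rcases hc : bestP g N M (i+1) j with _ | p1 <;> rw [hc] at h
      · rcases hc2 : bestP g N M i (j+1) with _ | p2 <;> rw [hc2] at h
        · simp at h
        · have hp : p = ((i : Int), (j : Int)) :: p2 := by simpa using h.symm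
          subst hp
          have := ih i (j+1) p2 (by omega) hc2
          simp only [List.length_cons]
          omega
      · have hp : p = ((i : Int), (j : Int)) :: p1 := by simpa using h.symm
        subst hp
        have := ih (i+1) j p1 (by omega) hc
        simp only [List.length_cons]
        omega

theorem bestP_length (g : Nat → Nat → Int) (N M i j : Nat) (p : List (Int × Int))
    (h : bestP g N M i j = some p) : p.length + i + j + 1 = N + M :=
  bestP_length_aux g N M ((N - i) + (M - j)) i j p (le_refl _) h

-- ---- A-side invariant: the dp table ----

def dpVal (g : Nat → Nat → Int) (N M i j r c : Nat) : Bool :=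
  if i < r ∨ (r = i ∧ j ≤ c) then (bestP g N M r c).isSome else false

def dpState (g : Nat → Nat → Int) (N M i j : Nat) : List (List Bool) :=
  (List.range (N+1)).map (fun r => (List.range (M+1)).map (fun c => dpVal g N M i j r c))

theorem dpGetB_dpState (g : Nat → Nat → Int) (N M i j r c : Nat)
    (hr : r ≤ N) (hc : c ≤ M) :
    dpGetB (dpState g N M i j) (r : Int) (c : Int) = dpVal g N M i j r c := by
  unfold dpGetB dpState
  rw [PySem.List.pyGetD_natCast, PySem.List.pyGetD_natCast]
  rw [map_range_getD _ _ _ _ (by omega), map_range_getD _ _ _ _ (by omega)]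

theorem dpState_init (g : Nat → Nat → Int) (N M : Nat) :
    List.replicate (N+1) (List.replicate (M+1) false) = dpState g N M N 0 := by
  unfold dpState
  rw [replicate_eq_map_range]
  apply map_range_congr
  intro r hr
  rw [replicate_eq_map_range]
  apply map_range_congr
  intro c hc
  unfold dpVal
  by_cases h1 : r = N
  · rw [if_pos (by omega : N < r ∨ (r = N ∧ 0 ≤ c)), h1,
        bestP_out g N M N c (by omega)]
    rfl
  · rw [if_neg (by omega)]

theorem dpState_shift (g : Nat → Nat → Int) (N M i : Nat) :
    dpState g N M (i+1) 0 = dpState g N M i M := by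
  unfold dpState
  apply map_range_congr
  intro r hr
  apply map_range_congr
  intro c hc
  unfold dpVal
  by_cases h1 : i < r
  · rw [if_pos (by omega), if_pos (Or.inl h1)]
  · rw [if_neg (by omega)]
    by_cases h2 : r = i ∧ M ≤ c
    · rw [if_pos (Or.inr h2)]
      have hcM : c = M := by omega
      rw [hcM, bestP_out g N M r M (by omega)]
      rfl
    · rw [if_neg (by omega)]

-- ---- B-side invariant rows ----

def rowB (g : Nat → Nat → Int) (N M i : Nat) : List (Option (List (Int × Int))) :=
  (List.range M).map (fun c => bestP g N M i c)

def curB (g : Nat → Nat → Int) (N M i j : Nat) : List (Option (List (Int × Int))) :=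
  (List.range M).map (fun c => if j ≤ c then bestP g N M i c else none)

-- ---- the reconstruction walk follows the stored path ----

theorem walk_eq (g : Nat → Nat → Int) (N M : Nat) :
    ∀ (fuel : Nat) (i j : Nat) (rest : List (Int × Int)) (acc : List (Int × Int)),
      bestP g N M i j = some (((i : Int), (j : Int)) :: rest) →
      rest.length ≤ fuel →
      walkGo (N : Int) (M : Int) (dpState g N M 0 0) fuel (i : Int) (j : Int) acc
        = acc ++ rest := by
  have hdp : ∀ (r c : Nat), r ≤ N → c ≤ M →
      dpGetB (dpState g N M 0 0) (r : Int) (c : Int) = (bestP g N M r c).isSome := by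
    intro r c hr hc
    rw [dpGetB_dpState g N M 0 0 r c hr hc]
    unfold dpVal
    rw [if_pos (by omega)]
  intro fuel
  induction fuel with
  | zero =>
    intro i j rest acc _ hlen
    have : rest = [] := List.eq_nil_of_length_eq_zero (by omega)
    simp [walkGo, this]
  | succ fuel ih =>
    intro i j rest acc h hlen
    obtain ⟨hi, hj⟩ := bestP_some_inrange g N M i j _ h
    rw [bestP_in g N M i j hi hj] at h
    split_ifs at h with h0 hg
    · -- goal cell: both moves are out of the grid, the loop stops at once
      have hrest : rest = [] := by simpa using h.symm
      show walkGo (N : Int) (M : Int) (dpState g N M 0 0) (fuel+1) (i : Int) (j : Int) acc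
          = acc ++ rest
      unfold walkGo
      rw [if_neg (by rintro ⟨hlt, -⟩; omega), if_neg (by rintro ⟨hlt, -⟩; omega)]
      simp [hrest]
    · rcases hc : bestP g N M (i+1) j with _ | p1 <;> rw [hc] at h
      · -- cannot move down; A's walk moves right
        rcases hc2 : bestP g N M i (j+1) with _ | p2 <;> rw [hc2] at h
        · simp at h
        · have hrest : rest = p2 := by simpa using h.symm
          obtain ⟨hi2, hj2⟩ := bestP_some_inrange g N M i (j+1) _ hc2
          obtain ⟨t, ht⟩ := bestP_some_head g N M i (j+1) _ hc2
          have hcast1 : (i : Int) + 1 = ((i+1 : Nat) : Int) := by push_cast; ring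
          have hcast2 : (j : Int) + 1 = ((j+1 : Nat) : Int) := by push_cast; ring
          show walkGo (N : Int) (M : Int) (dpState g N M 0 0) (fuel+1) (i : Int) (j : Int) acc
              = acc ++ rest
          unfold walkGo
          rw [if_neg (by
            rintro ⟨-, hdg⟩
            rw [hcast1, hdp (i+1) j (by omega) (by omega), hc] at hdg
            simp at hdg)]
          rw [if_pos ⟨by omega, by rw [hcast2, hdp i (j+1) (by omega) (by omega), hc2]; rfl⟩]
          by_cases hgoal : (i : Int) = (N : Int) - 1 ∧ (j : Int) + 1 = (M : Int) - 1
          · rw [if_pos hgoal]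
            -- the cell stepped to is the goal, so its stored path is the singleton
            have : bestP g N M i (j+1) = some [((i : Int), ((j+1 : Nat) : Int))] := by
              rw [bestP_in g N M i (j+1) hi hj2]
              rw [if_neg (by intro hz; rw [bestP_in g N M i (j+1) hi hj2, if_pos hz] at hc2; simp at hc2)]
              rw [if_pos (by omega)]
            rw [this] at hc2
            have : p2 = [((i : Int), ((j+1 : Nat) : Int))] := by simpa using hc2.symm
            rw [hrest, this, hcast2]
          · rw [if_neg hgoal, hcast2]
            rw [ih i (j+1) t (acc ++ [((i : Int), ((j+1 : Nat) : Int))])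
              (by rw [hc2, ht]) (by rw [hrest, ht] at hlen; simp at hlen; omega)]
            rw [hrest, ht]; simp
      · -- A's walk moves down
        have hrest : rest = p1 := by simpa using h.symm
        obtain ⟨hi1, hj1⟩ := bestP_some_inrange g N M (i+1) j _ hc
        obtain ⟨t, ht⟩ := bestP_some_head g N M (i+1) j _ hc
        have hcast1 : (i : Int) + 1 = ((i+1 : Nat) : Int) := by push_cast; ring
        show walkGo (N : Int) (M : Int) (dpState g N M 0 0) (fuel+1) (i : Int) (j : Int) acc
            = acc ++ rest
        unfold walkGo
        rw [if_pos ⟨by omega, by rw [hcast1, hdp (i+1) j (by omega) (by omega), hc]; rfl⟩]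
        by_cases hgoal : (i : Int) + 1 = (N : Int) - 1 ∧ (j : Int) = (M : Int) - 1
        · rw [if_pos hgoal]
          have : bestP g N M (i+1) j = some [(((i+1 : Nat) : Int), (j : Int))] := by
            rw [bestP_in g N M (i+1) j hi1 hj1]
            rw [if_neg (by intro hz; rw [bestP_in g N M (i+1) j hi1 hj1, if_pos hz] at hc; simp at hc)]
            rw [if_pos (by omega)]
          rw [this] at hc
          have : p1 = [(((i+1 : Nat) : Int), (j : Int))] := by simpa using hc.symm
          rw [hrest, this, hcast1]
        · rw [if_neg hgoal, hcast1]
          rw [ih (i+1) j t (acc ++ [(((i+1 : Nat) : Int), (j : Int))])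
            (by rw [hc, ht]) (by rw [hrest, ht] at hlen; simp at hlen; omega)]
          rw [hrest, ht]; simp

-- ---- each port computes (bestP g N M 0 0).getD [] ----

theorem innA_eq (grid : List (List Int)) (N M k j : Nat) (hk : k < N) (hj : j < M) :
    innA grid (N : Int) (M : Int) (k : Int) (dpState (gOf grid) N M k (j+1)) (j : Int)
      = dpState (gOf grid) N M k j := by
  unfold innA
  have hread : PySem.List.pyGetD (PySem.List.pyGetD grid (k : Int) []) (j : Int) 0
      = gOf grid k j := by
    simp [gOf]
  have hcast1 : (k : Int) + 1 = ((k+1 : Nat) : Int) := by push_cast; ring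
  have hcast2 : (j : Int) + 1 = ((j+1 : Nat) : Int) := by push_cast; ring
  have hdown : dpGetB (dpState (gOf grid) N M k (j+1)) ((k : Int)+1) (j : Int)
      = (bestP (gOf grid) N M (k+1) j).isSome := by
    rw [hcast1, dpGetB_dpState (gOf grid) N M k (j+1) (k+1) j (by omega) (by omega)]
    unfold dpVal
    rw [if_pos (Or.inl (by omega))]
  have hright : dpGetB (dpState (gOf grid) N M k (j+1)) (k : Int) ((j : Int)+1)
      = (bestP (gOf grid) N M k (j+1)).isSome := by
    rw [hcast2, dpGetB_dpState (gOf grid) N M k (j+1) k (j+1) (by omega) (by omega)]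
    unfold dpVal
    rw [if_pos (Or.inr ⟨rfl, le_refl _⟩)]
  have hv : (if PySem.List.pyGetD (PySem.List.pyGetD grid (k : Int) []) (j : Int) 0 = 0 then false
      else if (k : Int) = (N : Int) - 1 ∧ (j : Int) = (M : Int) - 1 then true
      else (dpGetB (dpState (gOf grid) N M k (j+1)) ((k : Int)+1) (j : Int)
            || dpGetB (dpState (gOf grid) N M k (j+1)) (k : Int) ((j : Int)+1)))
      = (bestP (gOf grid) N M k j).isSome := by
    rw [hread, hdown, hright, bestP_isSome (gOf grid) N M k j hk hj]
    exact if_congr Iff.rfl rfl (if_congr (by omega) rfl rfl)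
  rw [hv]
  have hrow : PySem.List.pyGetD (dpState (gOf grid) N M k (j+1)) (k : Int) []
      = (List.range (M+1)).map (fun c => dpVal (gOf grid) N M k (j+1) k c) := by
    unfold dpState
    rw [PySem.List.pyGetD_natCast]
    exact map_range_getD _ _ _ _ (by omega)
  rw [hrow, PySem.List.pySetD_natCast, PySem.List.pySetD_natCast, map_range_set]
  unfold dpState
  rw [map_range_set]
  apply map_range_congr
  intro r hr
  by_cases hrk : r = k
  · subst hrk
    rw [if_pos rfl]
    apply map_range_congr
    intro c hc
    by_cases hcj : c = j
    · subst hcj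
      rw [if_pos rfl]
      unfold dpVal
      rw [if_pos (Or.inr ⟨rfl, le_refl _⟩)]
    · rw [if_neg hcj]
      unfold dpVal
      exact if_congr (by omega) rfl rfl
  · rw [if_neg hrk]
    apply map_range_congr
    intro c hc
    unfold dpVal
    exact if_congr (by omega) rfl rfl

theorem outA_eq (grid : List (List Int)) (N M k : Nat) (hk : k < N) :
    outA grid (N : Int) (M : Int) (dpState (gOf grid) N M (k+1) 0) (k : Int)
      = dpState (gOf grid) N M k 0 := by
  unfold outA
  rw [dpState_shift]
  exact foldl_countdown (innA grid (N : Int) (M : Int) (k : Int))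
    (fun j dp => dp = dpState (gOf grid) N M k j) M (dpState (gOf grid) N M k M)
    (fun j dp hj hdp => by rw [hdp]; exact innA_eq grid N M k j hk hj) rfl

theorem foldA (grid : List (List Int)) (N M : Nat) :
    (PySem.List.pyRange ((N : Int) - 1) (-1) (-1)).foldl
        (outA grid (N : Int) (M : Int))
        (List.replicate (((N : Int)).toNat + 1) (List.replicate (((M : Int)).toNat + 1) false))
      = dpState (gOf grid) N M 0 0 := by
  apply foldl_countdown (outA grid (N : Int) (M : Int))
    (fun k dp => dp = dpState (gOf grid) N M k 0) N
  · intro k s hk hs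
    rw [hs]
    exact outA_eq grid N M k hk
  · rw [Int.toNat_natCast, Int.toNat_natCast]
    exact dpState_init (gOf grid) N M

theorem portA_eq (grid : List (List Int)) :
    robot_grid2 grid
      = (bestP (gOf grid) grid.length (PySem.List.pyGetD grid 0 []).length 0 0).getD [] := by
  simp only [robot_grid2]
  rw [foldA grid grid.length (PySem.List.pyGetD grid 0 []).length]
  have h00 : dpGetB (dpState (gOf grid) grid.length (PySem.List.pyGetD grid 0 []).length 0 0) 0 0
      = (bestP (gOf grid) grid.length (PySem.List.pyGetD grid 0 []).length 0 0).isSome := by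
    have h := dpGetB_dpState (gOf grid) grid.length (PySem.List.pyGetD grid 0 []).length 0 0 0 0
      (Nat.zero_le _) (Nat.zero_le _)
    unfold dpVal at h
    rw [if_pos (Or.inr ⟨rfl, le_refl _⟩)] at h
    simpa using h
  rcases hb : bestP (gOf grid) grid.length (PySem.List.pyGetD grid 0 []).length 0 0 with _ | p
  · rw [if_pos (by rw [h00, hb]; simp)]
    rfl
  · rw [if_neg (by rw [h00, hb]; simp)]
    obtain ⟨t, ht⟩ := bestP_some_head _ _ _ _ _ _ hb
    have hlen := bestP_length _ _ _ _ _ _ hb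
    have hw := walk_eq (gOf grid) grid.length (PySem.List.pyGetD grid 0 []).length
      (grid.length + (PySem.List.pyGetD grid 0 []).length) 0 0 t [((0 : Int), (0 : Int))]
      (by rw [hb, ht]) (by rw [ht] at hlen; simp at hlen; omega)
    rw [Int.toNat_natCast, Int.toNat_natCast]
    simp only [Nat.cast_zero] at hw
    rw [hw, ht]
    simp

-- skip-update: if cell (k,j) has no path, processing column j leaves cur unchanged
theorem curB_skip (grid : List (List Int)) (N M k j : Nat)
    (hnone : bestP (gOf grid) N M k j = none) :
    curB (gOf grid) N M k (j+1) = curB (gOf grid) N M k j := by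
  unfold curB
  apply map_range_congr
  intro c hc
  by_cases hcj : c = j
  · subst hcj
    rw [if_neg (by omega), if_pos (by omega), hnone]
  · exact if_congr (by omega) rfl rfl

-- set-update: writing the path of cell (k,j) into column j advances the invariant
theorem curB_set (grid : List (List Int)) (N M k j : Nat) (hj : j < M)
    (p : List (Int × Int)) (hp : bestP (gOf grid) N M k j = some p) :
    PySem.List.pySetD (curB (gOf grid) N M k (j+1)) (j : Int) (some p)
      = curB (gOf grid) N M k j := by
  unfold curB
  rw [PySem.List.pySetD_natCast, map_range_set]
  apply map_range_congr
  intro c hc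
  by_cases hcj : c = j
  · subst hcj
    rw [if_pos rfl, if_pos (by omega), hp]
  · rw [if_neg hcj]
    exact if_congr (by omega) rfl rfl

theorem innB_eq (grid : List (List Int)) (N M k j : Nat) (hk : k < N) (hj : j < M) :
    innB grid (N : Int) (M : Int) (rowB (gOf grid) N M (k+1)) (k : Int)
        (curB (gOf grid) N M k (j+1)) (j : Int)
      = curB (gOf grid) N M k j := by
  unfold innB
  have hread : PySem.List.pyGetD (PySem.List.pyGetD grid (k : Int) []) (j : Int) 0
      = gOf grid k j := by
    simp [gOf]
  rw [hread]
  have hbelow : PySem.List.pyGetD (rowB (gOf grid) N M (k+1)) (j : Int) none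
      = bestP (gOf grid) N M (k+1) j := by
    unfold rowB
    rw [PySem.List.pyGetD_natCast]
    exact map_range_getD _ _ _ _ hj
  by_cases h0 : gOf grid k j = 0
  · rw [if_neg (not_not_intro h0)]
    exact curB_skip grid N M k j (by rw [bestP_in _ _ _ _ _ hk hj, if_pos h0])
  · rw [if_pos h0]
    by_cases hgoal : (k : Int) = (N : Int) - 1 ∧ (j : Int) = (M : Int) - 1
    · rw [if_pos hgoal]
      exact curB_set grid N M k j hj _
        (by rw [bestP_in _ _ _ _ _ hk hj, if_neg h0, if_pos (by omega)])
    · rw [if_neg hgoal, hbelow]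
      rcases hc : bestP (gOf grid) N M (k+1) j with _ | p1
      · by_cases hj1 : (j : Int) + 1 < (M : Int)
        · rw [if_pos hj1]
          have hcur : PySem.List.pyGetD (curB (gOf grid) N M k (j+1)) ((j : Int)+1) none
              = bestP (gOf grid) N M k (j+1) := by
            unfold curB
            have hcast : (j : Int) + 1 = ((j+1 : Nat) : Int) := by push_cast; ring
            rw [hcast, PySem.List.pyGetD_natCast, map_range_getD _ _ _ _ (by omega),
              if_pos (le_refl _)]
          rw [hcur]
          rcases hc2 : bestP (gOf grid) N M k (j+1) with _ | p2
          · exact curB_skip grid N M k j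
              (by rw [bestP_in _ _ _ _ _ hk hj, if_neg h0, if_neg (by omega), hc, hc2])
          · exact curB_set grid N M k j hj _
              (by rw [bestP_in _ _ _ _ _ hk hj, if_neg h0, if_neg (by omega), hc, hc2])
        · rw [if_neg hj1]
          exact curB_skip grid N M k j
            (by rw [bestP_in _ _ _ _ _ hk hj, if_neg h0, if_neg (by omega), hc,
                bestP_out (gOf grid) N M k (j+1) (by omega)])
      · exact curB_set grid N M k j hj _
          (by rw [bestP_in _ _ _ _ _ hk hj, if_neg h0, if_neg (by omega), hc])

theorem outB_eq (grid : List (List Int)) (N M k : Nat) (hk : k < N) :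
    outB grid (N : Int) (M : Int) (rowB (gOf grid) N M (k+1)) (k : Int)
      = rowB (gOf grid) N M k := by
  unfold outB
  have hinit : List.replicate ((M : Int)).toNat none = curB (gOf grid) N M k M := by
    rw [Int.toNat_natCast, replicate_eq_map_range]
    unfold curB
    apply map_range_congr
    intro c hc
    rw [if_neg (by omega)]
  rw [hinit]
  have hfold := foldl_countdown (innB grid (N : Int) (M : Int) (rowB (gOf grid) N M (k+1)) (k : Int))
    (fun j cur => cur = curB (gOf grid) N M k j) M (curB (gOf grid) N M k M)
    (fun j cur hj hcur => by rw [hcur]; exact innB_eq grid N M k j hk hj) rfl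
  rw [hfold]
  unfold curB rowB
  apply map_range_congr
  intro c hc
  rw [if_pos (Nat.zero_le c)]

theorem foldB (grid : List (List Int)) (N M : Nat) :
    (PySem.List.pyRange ((N : Int) - 1) (-1) (-1)).foldl
        (outB grid (N : Int) (M : Int)) (List.replicate ((M : Int)).toNat none)
      = rowB (gOf grid) N M 0 := by
  apply foldl_countdown (outB grid (N : Int) (M : Int))
    (fun k below => below = rowB (gOf grid) N M k) N
  · intro k s hk hs
    rw [hs]
    exact outB_eq grid N M k hk
  · rw [Int.toNat_natCast, replicate_eq_map_range]
    unfold rowB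
    apply map_range_congr
    intro c hc
    rw [bestP_out (gOf grid) N M N c (by omega)]

theorem portB_eq (grid : List (List Int)) :
    robot_grid2_alt grid
      = (bestP (gOf grid) grid.length (PySem.List.pyGetD grid 0 []).length 0 0).getD [] := by
  simp only [robot_grid2_alt]
  rw [foldB grid grid.length (PySem.List.pyGetD grid 0 []).length]
  by_cases hM : 0 < (PySem.List.pyGetD grid 0 []).length
  · rw [if_pos (by exact_mod_cast hM)]
    have h0 : PySem.List.pyGetD (rowB (gOf grid) grid.length (PySem.List.pyGetD grid 0 []).length 0) 0 none
        = bestP (gOf grid) grid.length (PySem.List.pyGetD grid 0 []).length 0 0 := by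
      unfold rowB
      rw [PySem.List.pyGetD_zero, List.getD_eq_getElem?_getD]
      simp [hM]
    rw [h0]
    rcases bestP (gOf grid) grid.length (PySem.List.pyGetD grid 0 []).length 0 0 with _ | p <;> rfl
  · rw [if_neg (by exact_mod_cast hM),
      bestP_out (gOf grid) grid.length (PySem.List.pyGetD grid 0 []).length 0 0 (by omega)]
    rfl

-- ===== VERDICT =====
theorem robot_grid2_spec : Claim_equal_robot_grid2 := by
  intro grid _ _
  unfold Spec_robot_grid2
  rw [portA_eq, portB_eq]
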